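-- pv_equiv track=rewrite | github.com/MrBrantCode/unitest_baseline | mut_generate/mist_train_cf/cf_4147/solution.py | count_unique_requests
-- ===== SOURCE A (Python) =====
-- def count_unique_requests(url_requests):
--     url_count = {}
--
--     for request in url_requests:
--         url, _, _ = request.partition('?')
--         if url in url_count:
--             url_count[url] += 1
--         else:
--             url_count[url] = 1
--
--     sorted_urls = []
--
--     while url_count:
--         max_count = -1
--         max_url = ""
--         for url, count in url_count.items():
--             if count > max_count:
--                 max_count = count
--                 max_url = url
--         sorted_urls.append((max_url, max_count))
--         del url_count[max_url]
--
--     return sorted_urls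
-- ===== SOURCE B (Python) =====
-- def count_unique_requests(url_requests):
--     url_count = {}
--     for request in url_requests:
--         url, _, _ = request.partition('?')
--         if url in url_count:
--             url_count[url] += 1
--         else:
--             url_count[url] = 1
--
--     # bucket sort by count instead of repeated max-scans
--     max_count = 0
--     for c in url_count.values():
--         if c > max_count:
--             max_count = c
--
--     buckets = {}
--     for url, c in url_count.items():
--         buckets.setdefault(c, []).append(url)
--
--     result = []
--     for c in range(max_count, 0, -1):
--         if c in buckets:
--             for url in buckets[c]:
--                 result.append((url, c))
--     return result
-- ===== Notes on version B (the rewrite author's own statement) =====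
-- stated objective: faster
-- what changed: The URL tally is kept, but the repeated full-dict max-scan-and-delete loop is replaced by a counting/bucket sort: one pass finds the maximum count, one pass groups URLs into per-count buckets, and a single walk from the maximum count down to 1 emits the (url, count) pairs, preserving first-insertion tie order.
import Mathlib
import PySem

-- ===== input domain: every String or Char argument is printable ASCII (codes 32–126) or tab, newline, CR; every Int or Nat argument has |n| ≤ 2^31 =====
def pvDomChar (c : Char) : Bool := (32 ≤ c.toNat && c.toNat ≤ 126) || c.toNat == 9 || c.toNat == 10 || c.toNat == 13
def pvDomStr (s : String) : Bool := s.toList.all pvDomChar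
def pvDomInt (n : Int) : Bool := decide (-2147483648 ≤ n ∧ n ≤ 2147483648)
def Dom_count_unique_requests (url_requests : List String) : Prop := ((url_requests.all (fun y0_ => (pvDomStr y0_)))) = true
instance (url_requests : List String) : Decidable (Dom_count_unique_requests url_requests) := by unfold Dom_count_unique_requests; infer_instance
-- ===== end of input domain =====

-- B replaces A's quadratic repeated max-scan-and-delete by a single counting/bucket sort
-- over the tally dict (objective: faster); the URL-tally step is the same in both.


-- ===== PORT A =====
-- request.partition('?')[0]: for the one-character separator '?' the part before the
-- first '?' is exactly takeWhile (· ≠ '?'); exact on all strings.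
def pvUrlOf (s : String) : String := String.ofList (s.toList.takeWhile (fun c => c ≠ '?'))

-- the tally loop shared verbatim by A and B (both Pythons contain the identical loop)
def pvCountStep (d : PySem.Dict String Int) (r : String) : PySem.Dict String Int :=
  let url := pvUrlOf r
  if d.contains url then d.insert url (d.getD url 0 + 1) else d.insert url 1

-- A's inner 'for url, count in url_count.items(): if count > max_count: …'
def pvFindMax (items : List (String × Int)) : Int × String :=
  items.foldl (fun acc p => if p.2 > acc.1 then (p.2, p.1) else acc) ((-1 : Int), "")

-- A's 'while url_count:' loop; fuel d.size is enough since each pass deletes the found key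
def pvSelLoop : Nat → PySem.Dict String Int → List (String × Int) → List (String × Int)
  | 0, _, acc => acc
  | n + 1, d, acc =>
    if d.items = [] then acc
    else
      let m := pvFindMax d.items
      pvSelLoop n (d.erase m.2) (acc ++ [(m.2, m.1)])

def count_unique_requests (url_requests : List String) : List (String × Int) :=
  let url_count := url_requests.foldl pvCountStep PySem.Dict.empty
  pvSelLoop url_count.size url_count []

-- ===== PORT B =====
def count_unique_requests_alt (url_requests : List String) : List (String × Int) :=
  let url_count := url_requests.foldl pvCountStep PySem.Dict.empty
  let max_count := url_count.values.foldl (fun mc c => if c > mc then c else mc) 0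
  let buckets := url_count.items.foldl
      (fun b p => b.modify p.2 [] (fun l => l ++ [p.1])) PySem.Dict.empty
  (PySem.List.pyRange max_count 0 (-1)).foldl
    (fun res c =>
      if buckets.contains c then res ++ (buckets.getD c []).map (fun u => (u, c)) else res) []

-- ===== PRECONDITION & SPEC =====
def Spec_count_unique_requests (url_requests : List String) (out : List (String × Int)) : Prop := out = count_unique_requests_alt url_requests
instance (url_requests : List String) (out : List (String × Int)) : Decidable (Spec_count_unique_requests url_requests out) := by unfold Spec_count_unique_requests; infer_instance

-- ===== CLAIM (what is proved, stated in full; the proofs are below) =====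
def Claim_equal_count_unique_requests : Prop := ∀ (url_requests : List String), Dom_count_unique_requests url_requests → Spec_count_unique_requests url_requests (count_unique_requests url_requests)

-- ===== LEMMAS AND PROOFS =====

-- maximum of the counts (0 for the empty dict), foldr form
def pvM (ps : List (String × Int)) : Int := ps.foldr (fun p r => max p.2 r) 0

-- buckets written out from the top level downwards
def pvDescN : Nat → List (String × Int) → List (String × Int)
  | 0, _ => []
  | n + 1, ps => ps.filter (fun p => p.2 == ((n + 1 : Nat) : Int)) ++ pvDescN n ps

theorem pvM_nonneg (ps : List (String × Int)) : 0 ≤ pvM ps := by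
  induction ps with
  | nil => simp [pvM]
  | cons p l ih => simp only [pvM, List.foldr_cons] at *; omega

theorem le_pvM (ps : List (String × Int)) (p : String × Int) (hp : p ∈ ps) : p.2 ≤ pvM ps := by
  induction ps with
  | nil => cases hp
  | cons q l ih =>
    rcases List.mem_cons.mp hp with h | h
    · subst h; simp only [pvM, List.foldr_cons]; omega
    · have := ih h; simp only [pvM, List.foldr_cons] at *; omega

theorem pvM_le (ps : List (String × Int)) (k : Int) (hk : 0 ≤ k)
    (h : ∀ p ∈ ps, p.2 ≤ k) : pvM ps ≤ k := by
  induction ps with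
  | nil => simpa [pvM] using hk
  | cons q l ih =>
    have h1 := h q (List.mem_cons_self ..)
    have h2 := ih (fun p hp => h p (List.mem_cons_of_mem _ hp))
    simp only [pvM, List.foldr_cons] at *; omega

theorem pv_foldl_max (ps : List (String × Int)) (a : Int) (ha : 0 ≤ a) :
    ps.foldl (fun r p => max r p.2) a = max a (pvM ps) := by
  induction ps generalizing a with
  | nil => simp [pvM]; omega
  | cons q l ih =>
    simp only [List.foldl_cons, pvM, List.foldr_cons]
    rw [ih (max a q.2) (by omega)]
    simp only [pvM]; omega

theorem pv_fm_stay (ps : List (String × Int)) (acc : Int × String)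
    (h : ∀ p ∈ ps, p.2 ≤ acc.1) :
    ps.foldl (fun acc p => if p.2 > acc.1 then (p.2, p.1) else acc) acc = acc := by
  induction ps with
  | nil => rfl
  | cons q l ih =>
    have h1 := h q (List.mem_cons_self ..)
    simp only [List.foldl_cons, if_neg (by omega : ¬ (q.2 > acc.1))]
    exact ih (fun p hp => h p (List.mem_cons_of_mem _ hp))

theorem pv_fm_main (ps : List (String × Int)) (acc : Int × String) (hne : ps ≠ [])
    (hpos : ∀ p ∈ ps, 1 ≤ p.2) (hlt : acc.1 < pvM ps) :
    ∃ q, ps.find? (fun p => p.2 == pvM ps) = some q ∧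
      ps.foldl (fun acc p => if p.2 > acc.1 then (p.2, p.1) else acc) acc = (q.2, q.1) := by
  induction ps generalizing acc with
  | nil => cases hne rfl
  | cons p l ih =>
    have hMcons : pvM (p :: l) = max p.2 (pvM l) := rfl
    by_cases hge : pvM l ≤ p.2
    · -- p is a/the first maximum
      refine ⟨p, ?_, ?_⟩
      · have hM : pvM (p :: l) = p.2 := by rw [hMcons]; omega
        exact List.find?_cons_of_pos (by simp [hM])
      · have hstep : (if p.2 > acc.1 then (p.2, p.1) else acc) = (p.2, p.1) := by
          rw [if_pos]; rw [hMcons] at hlt; omega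
        simp only [List.foldl_cons, hstep]
        exact pv_fm_stay l (p.2, p.1) (fun r hr => le_trans (le_pvM l r hr) hge)
    · -- maximum lies in l
      rw [not_le] at hge
      have hMl : pvM (p :: l) = pvM l := by rw [hMcons]; omega
      have hlne : l ≠ [] := by
        intro h; subst h; simp [pvM] at hge
        have := hpos p (List.mem_cons_self ..); omega
      have hlt' : (if p.2 > acc.1 then (p.2, p.1) else acc).1 < pvM l := by
        by_cases hpc : p.2 > acc.1
        · simp only [if_pos hpc]; omega
        · simp only [if_neg hpc]; rw [hMl] at hlt; omega
      obtain ⟨q, hq1, hq2⟩ := ih (if p.2 > acc.1 then (p.2, p.1) else acc) hlne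
        (fun r hr => hpos r (List.mem_cons_of_mem _ hr)) hlt'
      refine ⟨q, ?_, ?_⟩
      · rw [hMl, List.find?_cons_of_neg (by simp; omega)]
        exact hq1
      · simpa using hq2

theorem pvDescN_le (n k : Nat) (ps : List (String × Int)) (hkn : k ≤ n)
    (h : ∀ p ∈ ps, p.2 ≤ (k : Int)) : pvDescN n ps = pvDescN k ps := by
  induction n with
  | zero => have : k = 0 := by omega
            subst this; rfl
  | succ m ih =>
    rcases Nat.eq_or_lt_of_le hkn with he | hl
    · subst he; rfl
    · have hk' : k ≤ m := by omega
      have hempty : ps.filter (fun p => p.2 == ((m + 1 : Nat) : Int)) = [] := by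
        rw [List.filter_eq_nil_iff]
        intro p hp
        have := h p hp
        simp only [beq_iff_eq]
        push_cast
        omega
      simp only [pvDescN, hempty, List.nil_append]
      exact ih hk'

theorem pvDescN_erase (t : Nat) (ps : List (String × Int)) (u : String)
    (h : ∀ p ∈ ps, p.1 = u → (t : Int) < p.2) :
    pvDescN t (ps.filter (fun p => !(p.1 == u))) = pvDescN t ps := by
  induction t with
  | zero => rfl
  | succ s ih =>
    have hlevel : (ps.filter (fun p => !(p.1 == u))).filter (fun p => p.2 == ((s + 1 : Nat) : Int))
        = ps.filter (fun p => p.2 == ((s + 1 : Nat) : Int)) := by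
      rw [List.filter_filter]
      apply List.filter_congr
      intro p hp
      by_cases hu : p.1 = u
      · have hlt := h p hp hu
        push_cast at hlt
        simp
        intro h2
        exfalso; omega
      · simp [hu]
    simp only [pvDescN, hlevel]
    rw [ih (fun p hp hu => lt_trans (by push_cast; omega) (h p hp hu))]

theorem pv_filter_find (m : Int) (ps : List (String × Int)) (q : String × Int)
    (hnd : (ps.map (·.1)).Nodup)
    (hf : ps.find? (fun p => p.2 == m) = some q) :
    ps.filter (fun p => p.2 == m)
      = q :: (ps.filter (fun p => !(p.1 == q.1))).filter (fun p => p.2 == m) := by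
  induction ps with
  | nil => simp at hf
  | cons p l ih =>
    simp only [List.map_cons, List.nodup_cons] at hnd
    by_cases hp : (p.2 == m) = true
    · rw [List.find?_cons_of_pos (l := l) hp] at hf
      injection hf with hq; subst hq
      have hkeys : ∀ r ∈ l, ¬ (r.1 = p.1) := by
        intro r hr he
        exact hnd.1 (he ▸ List.mem_map_of_mem hr)
      have hfix : l.filter (fun r => !(r.1 == p.1)) = l := by
        rw [List.filter_eq_self]
        intro r hr; simpa using hkeys r hr
      simp only [List.filter_cons, hp, if_pos]
      simp [hfix]
    · rw [List.find?_cons_of_neg (l := l) (by simpa using hp)] at hf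
      have hq_mem : q ∈ l := List.mem_of_find?_eq_some hf
      have hne : ¬ (p.1 = q.1) := by
        intro he
        exact hnd.1 (he ▸ List.mem_map_of_mem hq_mem)
      have := ih hnd.2 hf
      have hpb : (p.2 == m) = false := by simpa using hp
      have hkb : (p.1 == q.1) = false := by simpa using hne
      simp only [List.filter_cons, hpb, hkb, Bool.not_false, if_true]
      simpa [hpb] using this

-- distinct keys: equal key means equal pair
theorem pv_key_eq {l : List (String × Int)} (h : (l.map (·.1)).Nodup) {p q : String × Int}
    (hp : p ∈ l) (hq : q ∈ l) (he : p.1 = q.1) : p = q := by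
  induction l with
  | nil => cases hp
  | cons a t ih =>
    simp only [List.map_cons, List.nodup_cons] at h
    rcases List.mem_cons.mp hp with h1 | h1 <;> rcases List.mem_cons.mp hq with h2 | h2
    · rw [h1, h2]
    · exfalso; apply h.1; rw [← h1, he]; exact List.mem_map_of_mem h2
    · exfalso; apply h.1; rw [← h2, ← he]; exact List.mem_map_of_mem h1
    · exact ih h.2 h1 h2

-- A's selection loop produces the buckets from pvM downwards
theorem pv_main (n : Nat) (ps : List (String × Int)) (acc : List (String × Int))
    (hn : ps.length ≤ n) (hnd : (ps.map (·.1)).Nodup) (hpos : ∀ p ∈ ps, 1 ≤ p.2) :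
    pvSelLoop n (PySem.Dict.mk ps) acc = acc ++ pvDescN (pvM ps).toNat ps := by
  induction n generalizing ps acc with
  | zero =>
    have hnil : ps = [] := List.eq_nil_of_length_eq_zero (Nat.le_zero.mp hn)
    subst hnil
    simp [pvSelLoop, pvM, pvDescN]
  | succ n ih =>
    by_cases hne : ps = []
    · subst hne
      simp [pvSelLoop, pvM, pvDescN]
    · have hitems : (PySem.Dict.mk ps).items = ps := rfl
      simp only [pvSelLoop, if_neg hne]
      obtain ⟨q, hfind, hfold⟩ := pv_fm_main ps ((-1 : Int), "") hne hpos
        (by have := pvM_nonneg ps; simp only []; omega)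
      have hfm : pvFindMax ps = (q.2, q.1) := hfold
      have hq2 : q.2 = pvM ps := by simpa using List.find?_some hfind
      have hqmem : q ∈ ps := List.mem_of_find?_eq_some hfind
      have herase : (PySem.Dict.mk ps).erase (pvFindMax ps).2
          = PySem.Dict.mk (ps.filter (fun p => !(p.1 == q.1))) := by
        rw [hfm]; rfl
      have hlen : (ps.filter (fun p => !(p.1 == q.1))).length < ps.length := by
        rw [List.length_filter_lt_length_iff_exists]
        exact ⟨q, hqmem, by simp⟩
      have hn' : (ps.filter (fun p => !(p.1 == q.1))).length ≤ n := by omega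
      have hnd' : ((ps.filter (fun p => !(p.1 == q.1))).map (·.1)).Nodup :=
        hnd.sublist (List.Sublist.map _ List.filter_sublist)
      have hpos' : ∀ p ∈ ps.filter (fun p => !(p.1 == q.1)), 1 ≤ p.2 :=
        fun p hp => hpos p (List.mem_of_mem_filter hp)
      rw [herase, ih _ _ hn' hnd' hpos']
      set ps' := ps.filter (fun p => !(p.1 == q.1)) with hps'
      suffices h : pvDescN (pvM ps).toNat ps = q :: pvDescN (pvM ps').toNat ps' by
        rw [hfm, h]; simp
      have hm1 : 1 ≤ pvM ps := by
        obtain ⟨p0, hp0⟩ := List.exists_mem_of_ne_nil ps hne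
        exact le_trans (hpos p0 hp0) (le_pvM ps p0 hp0)
      have htt : (pvM ps).toNat = ((pvM ps).toNat - 1) + 1 := by omega
      set t := (pvM ps).toNat - 1 with ht
      have hcast : ((t + 1 : Nat) : Int) = pvM ps := by omega
      have hfilter := pv_filter_find (pvM ps) ps q hnd hfind
      have herase2 : pvDescN t ps' = pvDescN t ps := by
        apply pvDescN_erase
        intro p hp hu
        have hpq : p = q := pv_key_eq hnd hp hqmem hu
        rw [hpq, hq2]
        omega
      have hbound : ∀ p ∈ ps', p.2 ≤ ((pvM ps').toNat : Int) := by
        intro p hp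
        have := le_pvM ps' p hp
        have := pvM_nonneg ps'
        omega
      have hMle : (pvM ps').toNat ≤ t + 1 := by
        have : pvM ps' ≤ pvM ps := pvM_le ps' (pvM ps) (by omega)
          (fun p hp => le_pvM ps p (List.mem_of_mem_filter hp))
        omega
      have hlast : pvDescN (t + 1) ps' = pvDescN (pvM ps').toNat ps' :=
        pvDescN_le (t + 1) ((pvM ps').toNat) ps' hMle hbound
      rw [htt]
      show pvDescN (t + 1) ps = q :: pvDescN (pvM ps').toNat ps'
      rw [← hlast]
      simp only [pvDescN, hcast, hfilter, ← hps']
      simp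
      exact herase2.symm

-- the tally dict has distinct keys and counts ≥ 1
theorem pv_count_inv (l : List String) (d : PySem.Dict String Int)
    (hnd : (d.items.map (·.1)).Nodup) (hpos : ∀ p ∈ d.items, 1 ≤ p.2) :
    ((l.foldl pvCountStep d).items.map (·.1)).Nodup ∧
      ∀ p ∈ (l.foldl pvCountStep d).items, 1 ≤ p.2 := by
  induction l generalizing d with
  | nil => exact ⟨hnd, hpos⟩
  | cons r l ih =>
    simp only [List.foldl_cons]
    apply ih
    · -- keys of the stepped dict stay Nodup
      show ((pvCountStep d r).items.map (·.1)).Nodup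
      unfold pvCountStep
      by_cases hc : d.contains (pvUrlOf r) = true
      · simp only [hc, if_true]
        have hkeq := PySem.Dict.keys_insert_of_contains d (d.getD (pvUrlOf r) 0 + 1) hc
        simp only [PySem.Dict.keys] at hkeq
        rw [hkeq]; exact hnd
      · have hcf : d.contains (pvUrlOf r) = false := by simpa using hc
        simp only [hcf, Bool.false_eq_true, if_false]
        have hk := PySem.Dict.keys_insert_of_not_contains d (1 : Int)
          (by simpa using hc)
        have : (d.insert (pvUrlOf r) 1).keys = d.keys ++ [pvUrlOf r] := hk
        simp only [PySem.Dict.keys] at this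
        rw [this]
        simp only [List.nodup_append, List.nodup_cons]
        refine ⟨hnd, by simp, ?_⟩
        intro a ha b hb
        rw [List.mem_singleton] at hb
        subst hb
        intro he
        subst he
        have : d.contains (pvUrlOf r) = true := by
          rw [PySem.Dict.contains_iff_mem_keys]
          simpa [PySem.Dict.keys] using ha
        exact hc this
    · -- counts stay ≥ 1
      intro p hp
      unfold pvCountStep at hp
      by_cases hc : d.contains (pvUrlOf r) = true
      · simp only [hc, if_true] at hp
        rcases (PySem.Dict.mem_items_insert _ _ _ _).mp hp with he | ⟨hm, _⟩
        · subst he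
          obtain ⟨v, hv⟩ := Option.isSome_iff_exists.mp
            (by rw [← PySem.Dict.contains_eq_isSome_get? d (pvUrlOf r)]; exact hc)
          have hvm : (pvUrlOf r, v) ∈ d.items := PySem.Dict.mem_items_of_get?_eq_some d hv
          have h1 : 1 ≤ v := hpos _ hvm
          have : d.getD (pvUrlOf r) 0 = v := PySem.Dict.getD_of_get?_eq_some d 0 hv
          simp [this]; omega
        · exact hpos p hm
      · have hcf : d.contains (pvUrlOf r) = false := by simpa using hc
        simp only [hcf, Bool.false_eq_true, if_false] at hp
        rcases (PySem.Dict.mem_items_insert _ _ _ _).mp hp with he | ⟨hm, _⟩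
        · subst he; simp
        · exact hpos p hm

-- range(m, 0, -1) written as a mapped List.range
theorem pv_pyRange_down (m : Int) (hm : 0 ≤ m) :
    PySem.List.pyRange m 0 (-1) = (List.range m.toNat).map (fun k : Nat => m - (k : Int)) := by
  unfold PySem.List.pyRange
  rw [if_neg (by norm_num)]
  rw [if_neg (by norm_num)]
  by_cases h0 : (0 : Int) < m
  · rw [if_pos h0]
    have : ((m - 0 + -(-1) - 1) / -(-1)) = m := by norm_num
    rw [this]
    apply List.map_congr_left
    intro k _
    ring
  · have : m = 0 := by omega
    subst this
    norm_num

-- pvDescN as a flatMap over the descending range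
theorem pv_descN_flatMap (t : Nat) (ps : List (String × Int)) :
    ((List.range t).map (fun k : Nat => ((t : Int) - (k : Int)))).flatMap
        (fun c => (ps.filter (fun p => p.2 == c)).map (fun p => (p.1, c)))
      = pvDescN t ps := by
  induction t with
  | zero => rfl
  | succ s ih =>
    rw [List.range_succ_eq_map]
    simp only [List.map_cons, List.flatMap_cons, List.map_map]
    have hc0 : ((s + 1 : Nat) : Int) - ((0 : Nat) : Int) = ((s + 1 : Nat) : Int) := by push_cast; ring
    have hbucket : (ps.filter (fun p => p.2 == ((s + 1 : Nat) : Int))).map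
        (fun p => (p.1, ((s + 1 : Nat) : Int))) = ps.filter (fun p => p.2 == ((s + 1 : Nat) : Int)) := by
      conv_rhs => rw [← List.map_id (ps.filter (fun p => p.2 == ((s + 1 : Nat) : Int)))]
      apply List.map_congr_left
      intro p hp
      have := (List.mem_filter.mp hp).2
      have h2 : p.2 = ((s + 1 : Nat) : Int) := by simpa using this
      rw [← h2]
      rfl
    have hshift : ((List.range s).map (Nat.succ · )).map (fun k : Nat => ((s + 1 : Nat) : Int) - (k : Int))
        = (List.range s).map (fun k : Nat => ((s : Nat) : Int) - (k : Int)) := by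
      rw [List.map_map]
      apply List.map_congr_left
      intro k _
      simp [Nat.succ_eq_add_one]
    rw [hc0, hbucket]
    simp only [pvDescN]
    congr 1
    rw [← ih, ← hshift]
    simp

-- B's range-and-buckets loop is pvDescN
theorem pv_alt_eq (ps : List (String × Int)) :
    ((PySem.List.pyRange (ps.foldl (fun r p => max r p.2) 0) 0 (-1)).foldl
      (fun res c =>
        if (ps.foldl (fun b p => b.modify p.2 [] (fun l => l ++ [p.1])) PySem.Dict.empty).contains c
        then res ++ ((ps.foldl (fun b p => b.modify p.2 [] (fun l => l ++ [p.1])) PySem.Dict.empty).getD c []).map (fun u => (u, c))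
        else res) [])
    = pvDescN (pvM ps).toNat ps := by
  have hmax : ps.foldl (fun r p => max r p.2) 0 = pvM ps := by
    rw [pv_foldl_max ps 0 le_rfl]; exact max_eq_right (pvM_nonneg ps)
  have hbuck : ∀ c : Int,
      (ps.foldl (fun b p => b.modify p.2 [] (fun l => l ++ [p.1])) PySem.Dict.empty).getD c []
        = (ps.filter (fun p => p.2 == c)).map (·.1) := by
    intro c
    have h1 : ps.foldl (fun b p => b.modify p.2 [] (fun l => l ++ [p.1])) PySem.Dict.empty
        = (ps.map (fun p => (p.2, p.1))).foldl
            (fun d p => d.modify p.1 [] (fun l => l ++ [p.2])) PySem.Dict.empty := by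
      rw [List.foldl_map]
    rw [h1, PySem.Dict.getD_foldl_modify_append]
    simp only [PySem.Dict.getD_empty, List.nil_append, List.filter_map, List.map_map]
    rfl
  have hkeys : ∀ c : Int,
      (ps.foldl (fun b p => b.modify p.2 [] (fun l => l ++ [p.1])) PySem.Dict.empty).contains c = false →
        ps.filter (fun p => p.2 == c) = [] := by
    intro c hc
    have hk := PySem.Dict.keys_foldl_modify_key ps (fun p => p.2) ([] : List String)
      (fun _ p => fun l => l ++ [p.1]) PySem.Dict.empty
    rw [List.filter_eq_nil_iff]
    intro p hp
    simp only [beq_iff_eq]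
    intro he
    have hmem : c ∈ (ps.foldl (fun b p => b.modify p.2 [] (fun l => l ++ [p.1])) PySem.Dict.empty).keys := by
      rw [hk, PySem.Dict.keys_empty, PySem.Set.update_nil_left, PySem.Set.mem_ofList, ← he]
      exact List.mem_map_of_mem hp
    rw [← PySem.Dict.contains_iff_mem_keys] at hmem
    rw [hc] at hmem
    cases hmem
  have hsteps : (fun (res : List (String × Int)) (c : Int) =>
        if (ps.foldl (fun b p => b.modify p.2 [] (fun l => l ++ [p.1])) PySem.Dict.empty).contains c
        then res ++ ((ps.foldl (fun b p => b.modify p.2 [] (fun l => l ++ [p.1])) PySem.Dict.empty).getD c []).map (fun u => (u, c))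
        else res)
      = fun res c => res ++ ((ps.filter (fun p => p.2 == c)).map (·.1)).map (fun u => (u, c)) := by
    funext res c
    by_cases hc : (ps.foldl (fun b p => b.modify p.2 [] (fun l => l ++ [p.1])) PySem.Dict.empty).contains c = true
    · rw [if_pos hc, hbuck c]
    · have hcf := Bool.eq_false_iff.mpr hc
      rw [if_neg hc, hkeys c hcf]
      simp
  rw [hsteps, PySem.List.foldl_append_eq_flatMap]
  rw [List.nil_append]
  rw [hmax, pv_pyRange_down (pvM ps) (pvM_nonneg ps)]
  rw [← pv_descN_flatMap ((pvM ps).toNat) ps]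
  have hcast : (((pvM ps).toNat : Nat) : Int) = pvM ps := Int.toNat_of_nonneg (pvM_nonneg ps)
  rw [hcast]
  congr 1
  funext c
  rw [List.map_map]
  rfl

-- ===== VERDICT (by name: the statement is the Claim_ definition above) =====
-- bridge: 'if c > mc then c else mc' is max
theorem pv_foldl_if_max (l : List Int) (a : Int) :
    l.foldl (fun mc c => if c > mc then c else mc) a = l.foldl (fun r c => max r c) a := by
  induction l generalizing a with
  | nil => rfl
  | cons c l ih =>
    simp only [List.foldl_cons]
    have : (if c > a then c else a) = max a c := by split_ifs <;> omega
    rw [this, ih]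

theorem count_unique_requests_spec : Claim_equal_count_unique_requests := by
  intro urs _hdom
  unfold Spec_count_unique_requests
  show count_unique_requests urs = count_unique_requests_alt urs
  unfold count_unique_requests count_unique_requests_alt
  obtain ⟨hnd, hpos⟩ := pv_count_inv urs PySem.Dict.empty (by simp [PySem.Dict.empty])
    (by simp [PySem.Dict.empty])
  set d := urs.foldl pvCountStep PySem.Dict.empty with hd
  have hA : pvSelLoop d.size d [] = pvDescN (pvM d.items).toNat d.items :=
    pv_main d.items.length d.items [] le_rfl hnd hpos
  rw [hA]
  have hv : d.values.foldl (fun mc c => if c > mc then c else mc) 0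
      = d.items.foldl (fun r p => max r p.2) 0 := by
    rw [pv_foldl_if_max]
    show (d.items.map (fun p => p.2)).foldl (fun r c => max r c) 0 = _
    rw [List.foldl_map]
  show pvDescN (pvM d.items).toNat d.items =
    (PySem.List.pyRange (d.values.foldl (fun mc c => if c > mc then c else mc) 0) 0 (-1)).foldl
      (fun res c =>
        if (d.items.foldl (fun b p => b.modify p.2 [] (fun l => l ++ [p.1])) PySem.Dict.empty).contains c
        then res ++ ((d.items.foldl (fun b p => b.modify p.2 [] (fun l => l ++ [p.1])) PySem.Dict.empty).getD c []).map (fun u => (u, c))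
        else res) []
  rw [hv]
  exact (pv_alt_eq d.items).symm
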